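-- pv_equiv track=rewrite | github.com/HimanshuLadva/Python-DSA | Leetcode/daily/202602/20260206.py | minRemoval
-- ===== SOURCE A (Python) =====
-- from typing import List
--
-- def minRemoval(nums: List[int], k: int) -> int:
--     n = len(nums)
--     nums.sort()
--     # min * k >= max
--     ans = n
--     right = 0
--     for left in range(n):
--         while right < n and nums[left] * k >= nums[right]:
--             right += 1
--         ans = min(ans, n - (right - left))
--
--     return ans
-- ===== SOURCE B (Python) =====
-- import bisect
--
-- def minRemoval(nums, k):
--     # Sort in place like the original, then: answer = n - (largest window
--     # [i, bisect_right(nums, nums[i]*k)) ), found by an independent binary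
--     # search per element instead of a monotonic right-pointer sweep.
--     nums.sort()
--     n = len(nums)
--     return n - max((bisect.bisect_right(nums, v * k) - i
--                     for i, v in enumerate(nums)), default=0)
-- ===== Notes on version B (the rewrite author's own statement) =====
-- stated objective: idiomatic
-- what changed: Replaces the amortized monotonic right-pointer sweep and running-min accumulator with a per-element bisect_right binary search and a single max over a generator (answer = n - largest window).
import Mathlib
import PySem

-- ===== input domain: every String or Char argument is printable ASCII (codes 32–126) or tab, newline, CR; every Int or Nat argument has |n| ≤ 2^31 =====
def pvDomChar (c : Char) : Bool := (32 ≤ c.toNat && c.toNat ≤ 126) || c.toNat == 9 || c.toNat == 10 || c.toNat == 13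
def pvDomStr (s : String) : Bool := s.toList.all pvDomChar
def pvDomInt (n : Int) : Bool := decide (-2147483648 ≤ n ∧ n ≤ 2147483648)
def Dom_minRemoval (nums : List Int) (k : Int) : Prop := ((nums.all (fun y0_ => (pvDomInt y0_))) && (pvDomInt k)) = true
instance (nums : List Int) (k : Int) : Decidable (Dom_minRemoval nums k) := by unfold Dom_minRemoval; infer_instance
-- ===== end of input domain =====

-- B replaces A's amortized right-pointer sweep + running-min accumulator by one
-- max over per-element bisect_right binary searches (idiomatic, same cost); like
-- A it sorts nums in place in Python — the equivalence is about the return value.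

-- ===== PORT A =====
-- the `while right < n and nums[left] * k >= nums[right]` loop; fuel only makes
-- the same computation total (fuel = n suffices since right only increases)
def pvWhileA (s : List Int) (t : Int) : Nat → Nat → Nat
  | 0, r => r
  | fuel+1, r =>
    if r < s.length ∧ s.getD r 0 ≤ t then pvWhileA s t fuel (r+1) else r

def minRemoval (nums : List Int) (k : Int) : Int :=
  let s := PySem.List.sorted nums (fun x => x) false
  let n := s.length
  let res := (List.range n).foldl (fun (st : Int × Nat) left =>
      let right := pvWhileA s (s.getD left 0 * k) n st.2
      (min st.1 ((n : Int) - ((right : Int) - (left : Int))), right)) ((n : Int), 0)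
  res.1

-- ===== PORT B =====
-- bisect.bisect_right is PySem.List.bisectRight; max(gen, default=0) is
-- (max? … id).getD 0; enumerate is PySem.List.enumerate
def minRemoval_alt (nums : List Int) (k : Int) : Int :=
  let s := PySem.List.sorted nums (fun x => x) false
  let n := s.length
  let terms := (PySem.List.enumerate s).map
      (fun iv => ((PySem.List.bisectRight s (iv.2 * k) : Int) - iv.1))
  (n : Int) - ((PySem.List.max? terms (fun x => x)).getD 0)

-- ===== PRECONDITION & SPEC =====
def Spec_minRemoval (nums : List Int) (k : Int) (out : Int) : Prop := out = minRemoval_alt nums k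
instance (nums : List Int) (k : Int) (out : Int) : Decidable (Spec_minRemoval nums k out) := by unfold Spec_minRemoval; infer_instance

-- ===== CLAIM (what is proved, stated in full; the proofs are below) =====
def Claim_equal_minRemoval : Prop := ∀ (nums : List Int) (k : Int), Dom_minRemoval nums k → Spec_minRemoval nums k (minRemoval nums k)

-- ===== LEMMAS AND PROOFS =====

-- number of elements ≤ nums[l]*k; in a sorted list this is both A's pointer
-- bound and B's bisect_right result
def pvC (s : List Int) (k : Int) (l : Nat) : Nat :=
  s.countP (fun y => decide (y ≤ s.getD l 0 * k))

def pvStepA (s : List Int) (k : Int) (st : Int × Nat) (left : Nat) : Int × Nat :=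
  let right := pvWhileA s (s.getD left 0 * k) s.length st.2
  (min st.1 ((s.length : Int) - ((right : Int) - (left : Int))), right)

def pvStepB (s : List Int) (k : Int) (ans : Int) (l : Nat) : Int :=
  min ans ((s.length : Int) - ((pvC s k l : Int) - (l : Int)))

-- characterization: in a sorted list, s[i] ≤ t iff i < (number of elements ≤ t)
lemma pv_getD_le_iff (s : List Int) (hs : s.Pairwise (· ≤ ·)) (t : Int) :
    ∀ i, i < s.length → (s.getD i 0 ≤ t ↔ i < s.countP (fun y => decide (y ≤ t))) := by
  induction s with
  | nil => intro i hi; simp at hi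
  | cons a s ih =>
    rcases List.pairwise_cons.mp hs with ⟨ha, hs'⟩
    intro i hi
    cases i with
    | zero =>
      simp only [List.getD_cons_zero, List.countP_cons]
      by_cases h : a ≤ t
      · simp [h]
      · have hz : s.countP (fun y => decide (y ≤ t)) = 0 := by
          apply List.countP_eq_zero.mpr
          intro x hx
          simp only [decide_eq_true_eq]
          exact fun hxt => h (le_trans (ha x hx) hxt)
        simp [h, hz]
    | succ i =>
      simp only [List.getD_cons_succ, List.countP_cons]
      have hi' : i < s.length := by simpa using hi
      by_cases h : a ≤ t
      · rw [ih hs' i hi']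
        simp [h]
      · have hz : s.countP (fun y => decide (y ≤ t)) = 0 := by
          apply List.countP_eq_zero.mpr
          intro x hx
          simp only [decide_eq_true_eq]
          exact fun hxt => h (le_trans (ha x hx) hxt)
        have hmem : s.getD i 0 ∈ s := by
          rw [List.getD_eq_getElem s 0 hi']
          exact List.getElem_mem hi'
        have hlhs : ¬ s.getD i 0 ≤ t := fun hle => h (le_trans (ha _ hmem) hle)
        have hrhs : ¬ (i + 1 < List.countP (fun y => decide (y ≤ t)) s
            + if decide (a ≤ t) = true then 1 else 0) := by
          simp [hz, h]
        exact iff_of_false hlhs hrhs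

lemma pv_countP_le (s : List Int) (p : Int → Bool) : s.countP p ≤ s.length :=
  List.countP_le_length

-- A's while loop advances the pointer to max r c where c = countP (· ≤ t)
lemma pvWhileA_eq (s : List Int) (hs : s.Pairwise (· ≤ ·)) (t : Int) :
    ∀ fuel r, r ≤ s.length → s.length - r ≤ fuel →
      pvWhileA s t fuel r = max r (s.countP (fun y => decide (y ≤ t))) := by
  intro fuel
  induction fuel with
  | zero =>
    intro r hr hf
    have hr' : r = s.length := by omega
    have hc := pv_countP_le s (fun y => decide (y ≤ t))
    simp [pvWhileA]
    omega
  | succ fuel ih =>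
    intro r hr hf
    by_cases h : r < s.length ∧ s.getD r 0 ≤ t
    · have hrc : r < s.countP (fun y => decide (y ≤ t)) :=
        (pv_getD_le_iff s hs t r h.1).mp h.2
      rw [pvWhileA, if_pos h, ih (r+1) (by omega) (by omega)]
      omega
    · rw [pvWhileA, if_neg h]
      have hc := pv_countP_le s (fun y => decide (y ≤ t))
      by_cases hrl : r < s.length
      · have : ¬ s.getD r 0 ≤ t := fun hle => h ⟨hrl, hle⟩
        have := (pv_getD_le_iff s hs t r hrl).not.mp this
        omega
      · omega

-- bisect_right on a sorted list is the count of elements ≤ t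
lemma pvBisect_eq (s : List Int) (hs : s.Pairwise (· ≤ ·)) (t : Int) :
    PySem.List.bisectRight s t = s.countP (fun y => decide (y ≤ t)) := by
  obtain ⟨hle, hlt, hgt⟩ := PySem.List.bisectRight_spec s t hs
  set r := PySem.List.bisectRight s t with hr
  set c := s.countP (fun y => decide (y ≤ t)) with hc
  have h1 : r ≤ c := by
    by_contra h
    push Not at h
    have hcl : c < s.length := by omega
    have : s.getD c 0 ≤ t := by
      rw [List.getD_eq_getElem s 0 hcl]
      exact hlt c hcl (by omega)
    have := (pv_getD_le_iff s hs t c hcl).mp this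
    omega
  have h2 : c ≤ r := by
    by_contra h
    push Not at h
    have hrl : r < s.length := by
      have := pv_countP_le s (fun y => decide (y ≤ t))
      omega
    have h3 : s.getD r 0 ≤ t := (pv_getD_le_iff s hs t r hrl).mpr h
    have h4 : t < s[r] := hgt r hrl (by omega)
    rw [List.getD_eq_getElem s 0 hrl] at h3
    omega
  omega

-- the invariant tying A's fold state to a clean running-min fold: equal running
-- answers, a bounded pointer, and a witness index where the pointer was attained
lemma pvInv (s : List Int) (k : Int) (hs : s.Pairwise (· ≤ ·)) :
    ∀ m : Nat,
      ((List.range m).foldl (pvStepA s k) ((s.length : Int), 0)).1 =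
        (List.range m).foldl (pvStepB s k) (s.length : Int) ∧
      ((List.range m).foldl (pvStepA s k) ((s.length : Int), 0)).2 ≤ s.length ∧
      (m = 0 ∨ ∃ l, l < m ∧
        pvC s k l = ((List.range m).foldl (pvStepA s k) ((s.length : Int), 0)).2 ∧
        ((List.range m).foldl (pvStepA s k) ((s.length : Int), 0)).1 ≤
          (s.length : Int) - ((((List.range m).foldl (pvStepA s k) ((s.length : Int), 0)).2 : Int) - (l : Int))) := by
  intro m
  induction m with
  | zero => simp
  | succ m ih =>
    obtain ⟨hAB, hr, hw⟩ := ih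
    rw [List.range_succ, List.foldl_append, List.foldl_append]
    simp only [List.foldl_cons, List.foldl_nil]
    set stA := (List.range m).foldl (pvStepA s k) ((s.length : Int), 0) with hstA
    set aB := (List.range m).foldl (pvStepB s k) (s.length : Int) with haB
    have hwhile : pvWhileA s (s.getD m 0 * k) s.length stA.2
        = max stA.2 (pvC s k m) :=
      pvWhileA_eq s hs _ s.length stA.2 hr (by omega)
    have hcle : pvC s k m ≤ s.length := pv_countP_le s _
    by_cases hc : stA.2 ≤ pvC s k m
    · have hmax : max stA.2 (pvC s k m) = pvC s k m := by omega
      refine ⟨?_, ?_, Or.inr ⟨m, by omega, ?_, ?_⟩⟩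
      · simp only [pvStepA, pvStepB, hwhile, hmax, hAB]
      · simp only [pvStepA, hwhile, hmax]; omega
      · simp only [pvStepA, hwhile, hmax]
      · simp only [pvStepA, hwhile, hmax]
        exact min_le_right _ _
    · rw [not_le] at hc
      have hmax : max stA.2 (pvC s k m) = stA.2 := by omega
      rcases hw with hm0 | ⟨l, hl, hcl, hle⟩
      · exfalso
        have : stA = ((s.length : Int), 0) := by rw [hstA, hm0]; simp
        rw [this] at hc
        simp at hc
      · have hA1 : stA.1 ≤ (s.length : Int) - ((stA.2 : Int) - (m : Int)) := by
          have : ((l : Nat) : Int) ≤ (m : Int) := by exact_mod_cast Nat.le_of_lt hl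
          omega
        have hAstep : pvStepA s k stA m = (stA.1, stA.2) := by
          simp only [pvStepA, hwhile, hmax]
          congr 1
          omega
        have hB1 : aB ≤ (s.length : Int) - ((pvC s k m : Int) - (m : Int)) := by
          have hclt : ((pvC s k m : Nat) : Int) < (stA.2 : Int) := by exact_mod_cast hc
          rw [← hAB]
          omega
        have hBstep : pvStepB s k aB m = aB := by
          simp only [pvStepB]
          omega
        refine ⟨?_, ?_, Or.inr ⟨l, by omega, ?_, ?_⟩⟩
        · rw [hAstep, hBstep]; exact hAB
        · rw [hAstep]; exact hr
        · rw [hAstep]; exact hcl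
        · rw [hAstep]; exact hle

-- the running-min fold is n minus the running-max of the window sizes
lemma pvFoldMin (s : List Int) (k : Int) :
    ∀ m : Nat, (List.range m).foldl (pvStepB s k) (s.length : Int)
      = (s.length : Int) -
        ((List.range m).map (fun l => (pvC s k l : Int) - (l : Int))).foldl max 0 := by
  intro m
  induction m with
  | zero => simp
  | succ m ih =>
    rw [List.range_succ, List.foldl_append, List.map_append, List.foldl_append]
    simp only [List.foldl_cons, List.foldl_nil, List.map_cons, List.map_nil, ih, pvStepB]
    omega

-- B's term list is the range-indexed list of window sizes
lemma pvTerms_eq (s : List Int) (k : Int) :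
    (PySem.List.enumerate s).map
        (fun iv => ((PySem.List.bisectRight s (iv.2 * k) : Int) - iv.1))
      = (List.range s.length).map
        (fun l => ((PySem.List.bisectRight s (s.getD l 0 * k) : Int) - (l : Int))) := by
  apply List.ext_getElem
  · simp [PySem.List.length_enumerate]
  · intro i h1 h2
    have hi : i < s.length := by simpa [PySem.List.length_enumerate] using h1
    simp [PySem.List.getElem_enumerate, List.getD, hi]

-- max(list, default=0) = foldl max 0 when the first element is ≥ 0
lemma pvMaxD (x : Int) (t : List Int) (hx : 0 ≤ x) :
    (PySem.List.max? (x :: t) (fun y => y)).getD 0 = (x :: t).foldl max 0 := by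
  rw [PySem.List.max?_id_cons]
  simp only [Option.getD_some, List.foldl_cons]
  have : max 0 x = x := by omega
  rw [this]

lemma pvA_eq (nums : List Int) (k : Int) :
    minRemoval nums k =
      ((List.range (PySem.List.sorted nums (fun x => x) false).length).foldl
        (pvStepA (PySem.List.sorted nums (fun x => x) false) k)
        (((PySem.List.sorted nums (fun x => x) false).length : Int), 0)).1 := rfl

-- ===== VERDICT (by name: the statement is the Claim_ definition above) =====
theorem minRemoval_spec : Claim_equal_minRemoval := by
  intro nums k _
  unfold Spec_minRemoval minRemoval_alt
  have hs : (PySem.List.sorted nums (fun x => x) false).Pairwise (· ≤ ·) :=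
    PySem.List.sorted_pairwise nums (fun x => x)
  set s := PySem.List.sorted nums (fun x => x) false with hsdef
  simp only
  rw [pvTerms_eq s k, pvA_eq, (pvInv s k hs s.length).1, pvFoldMin s k]
  have hb : ∀ l, PySem.List.bisectRight s (s.getD l 0 * k) = pvC s k l := by
    intro l; exact pvBisect_eq s hs _
  simp only [hb]
  congr 1
  cases hn : s.length with
  | zero => simp [PySem.List.max?]
  | succ m =>
    rw [List.range_succ_eq_map]
    simp only [List.map_cons]
    rw [pvMaxD _ _ (by omega)]
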